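-- pv_equiv track=rewrite | github.com/Qinjingxue/Smart-Unpacker | sunpack/filesystem/filters/modules/scene_semantics.py | _under_or_same_key
-- ===== SOURCE A (Python) =====
-- from typing import Any
--
-- def _normalized_path(path: Any) -> str:
--     return str(path or "").replace("\\", "/").rstrip("/")
--
-- def _under_or_same_key(path: Any, parent_keys: set[str]) -> bool:
--     if not parent_keys:
--         return False
--     key = _normalized_path(path).lower()
--     if key in parent_keys:
--         return True
--     parts = key.split("/")
--     for index in range(len(parts) - 1, 0, -1):
--         if "/".join(parts[:index]) in parent_keys:
--             return True
--     return False
-- ===== SOURCE B (Python) =====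
-- from typing import Any
--
-- def _normalized_path(path: Any) -> str:
--     return str(path or "").replace("\\", "/").rstrip("/")
--
-- def _under_or_same_key(path: Any, parent_keys: set[str]) -> bool:
--     key = _normalized_path(path).lower()
--     return any(key == pk or key.startswith(pk + "/") for pk in parent_keys)
-- ===== Notes on version B (the rewrite author's own statement) =====
-- stated objective: idiomatic
-- what changed: Instead of splitting the key into '/'-segments and probing the set with every rejoined ancestor prefix, B iterates over the parent keys themselves and does a direct string test (key == pk or key.startswith(pk + '/')), inverting both the traversal subject and the role of the set.
import Mathlib
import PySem

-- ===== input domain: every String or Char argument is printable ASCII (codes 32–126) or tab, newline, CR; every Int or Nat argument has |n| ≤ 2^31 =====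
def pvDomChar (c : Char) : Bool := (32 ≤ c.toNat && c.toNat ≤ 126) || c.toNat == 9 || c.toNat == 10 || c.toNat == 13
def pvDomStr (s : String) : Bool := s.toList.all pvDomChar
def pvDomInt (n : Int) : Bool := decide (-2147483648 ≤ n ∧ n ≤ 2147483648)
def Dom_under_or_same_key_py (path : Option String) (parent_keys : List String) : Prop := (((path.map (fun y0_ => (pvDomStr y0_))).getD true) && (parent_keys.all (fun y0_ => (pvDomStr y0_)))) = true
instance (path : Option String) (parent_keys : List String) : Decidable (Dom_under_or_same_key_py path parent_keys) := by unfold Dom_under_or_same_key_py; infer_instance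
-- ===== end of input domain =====

-- B replaces A's split-the-key-and-probe-the-set prefix loop by a direct scan of the
-- parent keys with a string-prefix test (more idiomatic; same exact return value).

-- ===== PORT A =====
-- shared module helper _normalized_path: str(path or "").replace("\\", "/").rstrip("/")
-- (the .rstrip("/") — rstrip with an explicit character set — is ported by hand: it drops
-- exactly the maximal run of trailing '/' characters, which is Python's behaviour here)
def pvNormalizedPath (path : Option String) : String :=
  let s := PySem.Str.replace (path.getD "") "\\" "/"
  String.ofList ((s.toList.reverse.dropWhile (fun c => c = '/')).reverse)

def under_or_same_key_py (path : Option String) (parent_keys : List String) : Bool :=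
  if parent_keys.isEmpty then false
  else
    let key := PySem.Str.lower (pvNormalizedPath path)
    if PySem.Set.contains parent_keys key then true
    else
      let parts := (PySem.Str.split? key "/").getD []
      (PySem.List.pyRange ((parts.length : Int) - 1) 0 (-1)).any fun index =>
        PySem.Set.contains parent_keys
          (PySem.Str.join "/" (PySem.List.slice parts none (some index)))

-- ===== PORT B =====
def under_or_same_key_py_alt (path : Option String) (parent_keys : List String) : Bool :=
  let key := PySem.Str.lower (pvNormalizedPath path)
  parent_keys.any fun pk => key == pk || PySem.Str.startswith key (pk ++ "/")

-- ===== PRECONDITION & SPEC =====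
def Spec_under_or_same_key_py (path : Option String) (parent_keys : List String) (out : Bool) : Prop := out = under_or_same_key_py_alt path parent_keys
instance (path : Option String) (parent_keys : List String) (out : Bool) : Decidable (Spec_under_or_same_key_py path parent_keys out) := by unfold Spec_under_or_same_key_py; infer_instance

-- ===== CLAIM (what is proved, stated in full; the proofs are below) =====
def Claim_equal_under_or_same_key_py : Prop := ∀ (path : Option String) (parent_keys : List String), Dom_under_or_same_key_py path parent_keys → Spec_under_or_same_key_py path parent_keys (under_or_same_key_py path parent_keys)

-- ===== LEMMAS AND PROOFS =====

-- structural recursion computing key.split("/") (single-character separator)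
def pvSplit : List Char → List (List Char)
  | [] => [[]]
  | c :: rest =>
    if c = '/' then [] :: pvSplit rest
    else match pvSplit rest with
      | [] => [[c]]  -- unreachable: pvSplit never returns []
      | p :: ps => (c :: p) :: ps

theorem pvSplit_ne_nil (s : List Char) : pvSplit s ≠ [] := by
  cases s with
  | nil => simp [pvSplit]
  | cons c rest =>
    simp only [pvSplit]
    split
    · simp
    · split <;> simp

theorem go_spec : ∀ (fuel : Nat) (l cur : List Char) (acc : List (List Char)), l.length < fuel →
    PySem.Chars.splitOn.go ['/'] fuel l cur acc =
      acc.reverse ++ (match pvSplit l with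
        | [] => [cur.reverse]
        | p :: ps => (cur.reverse ++ p) :: ps) := by
  intro fuel
  induction fuel with
  | zero => intro l cur acc h; omega
  | succ n ih =>
    intro l cur acc h
    cases l with
    | nil =>
      simp [PySem.Chars.splitOn.go, pvSplit]
    | cons c rest =>
      by_cases hc : c = '/'
      · subst hc
        rw [PySem.Chars.splitOn.go]
        simp only [List.isPrefixOf, beq_self_eq_true, Bool.and_self, if_pos]
        show PySem.Chars.splitOn.go ['/'] n rest [] (cur.reverse :: acc) = _
        rw [ih rest [] (cur.reverse :: acc) (by simpa using Nat.lt_of_succ_lt_succ h)]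
        simp [pvSplit]
        cases hps : pvSplit rest with
        | nil => exact absurd hps (pvSplit_ne_nil rest)
        | cons p ps => simp
      · rw [PySem.Chars.splitOn.go]
        have hpre : List.isPrefixOf ['/'] (c :: rest) = false := by
          simp [List.isPrefixOf]; exact fun h' => absurd h'.symm hc
        rw [hpre]
        simp only [Bool.false_eq_true, if_false]
        rw [ih rest (c :: cur) acc (by simpa using Nat.lt_of_succ_lt_succ h)]
        simp only [pvSplit, if_neg hc]
        cases hps : pvSplit rest with
        | nil => exact absurd hps (pvSplit_ne_nil rest)
        | cons p ps => simp

theorem splitOn_eq (s : List Char) : PySem.Chars.splitOn s ['/'] = pvSplit s := by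
  rw [PySem.Chars.splitOn, go_spec (s.length + 1) s [] [] (by omega)]
  cases hps : pvSplit s with
  | nil => exact absurd hps (pvSplit_ne_nil s)
  | cons p ps => simp

theorem join_cons_head (c : Char) (p : List Char) (t : List (List Char)) :
    PySem.Chars.join ['/'] ((c :: p) :: t) = c :: PySem.Chars.join ['/'] (p :: t) := by
  cases t with
  | nil => simp [PySem.Chars.join_singleton]
  | cons q t' => simp [PySem.Chars.join_cons_cons]

theorem join_nil_head (t : List (List Char)) (h : t ≠ []) :
    PySem.Chars.join ['/'] ([] :: t) = '/' :: PySem.Chars.join ['/'] t := by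
  cases t with
  | nil => exact absurd rfl h
  | cons q t' => simp [PySem.Chars.join_cons_cons]

theorem take_ne_nil_of_ge_one {i : Nat} (l : List (List Char)) (hl : l ≠ []) (hi : 1 ≤ i) :
    List.take i l ≠ [] := by
  cases l with
  | nil => exact absurd rfl hl
  | cons a b =>
    cases i with
    | zero => omega
    | succ k => simp

-- the heart of the equivalence: p + "/" is a prefix of s  iff  p is one of the
-- "/".join(parts[:i]) strings A's loop probes (parts = s.split("/"), 1 ≤ i ≤ len-1)
theorem core (s : List Char) : ∀ (p : List Char),
    (p ++ ['/'] <+: s) ↔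
      ∃ i : Nat, 1 ≤ i ∧ i ≤ (pvSplit s).length - 1 ∧
        PySem.Chars.join ['/'] ((pvSplit s).take i) = p := by
  induction s with
  | nil =>
    intro p
    constructor
    · intro h
      have := h.length_le
      simp at this
    · rintro ⟨i, h1, h2, -⟩
      simp [pvSplit] at h2
      omega
  | cons c rest ih =>
    intro p
    have hlen1 : 1 ≤ (pvSplit rest).length := by
      cases h : pvSplit rest with
      | nil => exact absurd h (pvSplit_ne_nil rest)
      | cons a b => simp
    by_cases hc : c = '/'
    · subst hc
      have hsplit : pvSplit ('/' :: rest) = [] :: pvSplit rest := by simp [pvSplit]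
      rw [hsplit]
      constructor
      · intro h
        cases p with
        | nil =>
          exact ⟨1, le_refl 1, by simp; omega, by simp [PySem.Chars.join_singleton]⟩
        | cons a p' =>
          rw [List.cons_append, List.cons_prefix_cons] at h
          obtain ⟨ha, h'⟩ := h
          obtain ⟨i', hi1, hi2, hj⟩ := (ih p').mp h'
          refine ⟨i' + 1, by omega, by simp; omega, ?_⟩
          rw [List.take_succ_cons,
            join_nil_head _ (take_ne_nil_of_ge_one _ (pvSplit_ne_nil rest) hi1), hj, ha]
      · rintro ⟨i, hi1, hi2, hj⟩
        match i, hi1 with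
        | 1, _ =>
          simp [PySem.Chars.join_singleton] at hj
          subst hj
          simp [List.cons_prefix_cons]
        | (i' + 2), _ =>
          have hi1' : 1 ≤ i' + 1 := by omega
          rw [List.take_succ_cons,
            join_nil_head _ (take_ne_nil_of_ge_one _ (pvSplit_ne_nil rest) hi1')] at hj
          subst hj
          rw [List.cons_append, List.cons_prefix_cons]
          refine ⟨rfl, (ih _).mpr ⟨i' + 1, hi1', ?_, rfl⟩⟩
          simp at hi2
          omega
    · obtain ⟨m0, ms', hms⟩ : ∃ m0 ms', pvSplit rest = m0 :: ms' := by
        cases h : pvSplit rest with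
        | nil => exact absurd h (pvSplit_ne_nil rest)
        | cons a b => exact ⟨a, b, rfl⟩
      have hsplit : pvSplit (c :: rest) = (c :: m0) :: ms' := by
        simp [pvSplit, if_neg hc, hms]
      rw [hsplit]
      constructor
      · intro h
        cases p with
        | nil =>
          rw [List.nil_append, List.cons_prefix_cons] at h
          exact absurd h.1.symm hc
        | cons a p' =>
          rw [List.cons_append, List.cons_prefix_cons] at h
          obtain ⟨ha, h'⟩ := h
          obtain ⟨i', hi1, hi2, hj⟩ := (ih p').mp h'
          rw [hms] at hi2 hj
          refine ⟨i', hi1, by simpa using hi2, ?_⟩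
          obtain ⟨k, rfl⟩ := Nat.exists_eq_add_of_le' hi1
          rw [List.take_succ_cons] at hj ⊢
          rw [join_cons_head, hj, ha]
      · rintro ⟨i, hi1, hi2, hj⟩
        obtain ⟨k, rfl⟩ := Nat.exists_eq_add_of_le' hi1
        rw [List.take_succ_cons, join_cons_head] at hj
        subst hj
        rw [List.cons_append, List.cons_prefix_cons]
        refine ⟨rfl, (ih _).mpr ⟨k + 1, hi1, ?_, ?_⟩⟩
        · rw [hms]; simpa using hi2
        · rw [hms, List.take_succ_cons]

theorem split?_slash (key : String) :
    PySem.Str.split? key "/" = some ((pvSplit key.toList).map String.ofList) := by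
  rw [PySem.Str.split?]
  have hsep : ("/" : String).toList = ['/'] := rfl
  rw [hsep, PySem.Chars.split?]
  simp [splitOn_eq]

theorem ports_eq (key : String) (pks : List String) :
    (if pks.isEmpty then false
     else if PySem.Set.contains pks key then true
     else
       (PySem.List.pyRange ((((PySem.Str.split? key "/").getD []).length : Int) - 1) 0 (-1)).any
         fun index =>
           PySem.Set.contains pks
             (PySem.Str.join "/" (PySem.List.slice ((PySem.Str.split? key "/").getD []) none (some index))))
    = pks.any fun pk => key == pk || PySem.Str.startswith key (pk ++ "/") := by
  by_cases hemp : pks.isEmpty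
  · rw [if_pos hemp]
    rw [List.isEmpty_iff] at hemp
    simp [hemp]
  · rw [if_neg hemp]
    by_cases hin : PySem.Set.contains pks key
    · rw [if_pos hin]
      rw [show PySem.Set.contains pks key = pks.contains key from rfl, List.contains_iff_mem] at hin
      symm
      simp only [List.any_eq_true]
      exact ⟨key, hin, by simp⟩
    · rw [if_neg hin]
      rw [show PySem.Set.contains pks key = pks.contains key from rfl] at hin
      have hnot : key ∉ pks := fun hmem => hin (List.contains_iff_mem.mpr hmem)
      rw [split?_slash]
      rw [Bool.eq_iff_iff]
      simp only [List.any_eq_true, Option.getD_some, List.length_map,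
        PySem.List.mem_pyRange_neg_one, Bool.or_eq_true, beq_iff_eq]
      constructor
      · rintro ⟨index, ⟨hpos, hle⟩, hcont⟩
        have h0 : (0:Int) ≤ index := le_of_lt hpos
        rw [PySem.List.slice_to _ h0] at hcont
        set j := index.toNat with hj
        rw [show PySem.Set.contains pks _ = List.contains pks _ from rfl,
          List.contains_iff_mem] at hcont
        refine ⟨_, hcont, Or.inr ?_⟩
        rw [PySem.Str.startswith_eq, PySem.Chars.startswith_iff]
        have hjl : String.toList (PySem.Str.join "/" (List.take j ((pvSplit key.toList).map String.ofList)))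
            = PySem.Chars.join ['/'] ((pvSplit key.toList).take j) := by
          rw [PySem.Str.toList_join, ← List.map_take]
          simp [Function.comp_def]
        have hcore := (core key.toList (PySem.Chars.join ['/'] ((pvSplit key.toList).take j))).mpr
          ⟨j, by omega, by omega, rfl⟩
        have happ : (PySem.Str.join "/" (List.take j ((pvSplit key.toList).map String.ofList)) ++ "/").toList
            = PySem.Chars.join ['/'] ((pvSplit key.toList).take j) ++ ['/'] := by
          rw [String.toList_append, hjl]; rfl
        rw [happ]
        exact hcore
      · rintro ⟨pk, hpk, hcase⟩
        rcases hcase with heq | hsw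
        · exact absurd (heq ▸ hpk) hnot
        · rw [PySem.Str.startswith_eq, PySem.Chars.startswith_iff,
            show (pk ++ "/").toList = pk.toList ++ ['/'] by rw [String.toList_append]; rfl] at hsw
          obtain ⟨i, hi1, hi2, hj⟩ := (core key.toList pk.toList).mp hsw
          have hlen1 : 1 ≤ (pvSplit key.toList).length := by
            cases h : pvSplit key.toList with
            | nil => exact absurd h (pvSplit_ne_nil key.toList)
            | cons a b => simp
          refine ⟨(i : Int), ⟨by exact_mod_cast hi1, by omega⟩, ?_⟩
          rw [PySem.List.slice_to _ (by positivity), Int.toNat_natCast]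
          have hjl : String.toList (PySem.Str.join "/" (List.take i ((pvSplit key.toList).map String.ofList)))
              = PySem.Chars.join ['/'] ((pvSplit key.toList).take i) := by
            rw [PySem.Str.toList_join, ← List.map_take]
            simp [Function.comp_def]
          have : PySem.Str.join "/" (List.take i ((pvSplit key.toList).map String.ofList)) = pk := by
            rw [← String.toList_inj, hjl, hj]
          rw [this, show PySem.Set.contains pks pk = List.contains pks pk from rfl,
            List.contains_iff_mem]
          exact hpk

-- ===== VERDICT (by name: the statement is the Claim_ definition above) =====
theorem under_or_same_key_py_spec : Claim_equal_under_or_same_key_py := by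
  intro path pks _
  unfold Spec_under_or_same_key_py under_or_same_key_py under_or_same_key_py_alt
  exact ports_eq (PySem.Str.lower (pvNormalizedPath path)) pks
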